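-- pv_equiv track=rewrite | github.com/Divyaanshvats/shl-genai-recommendation | recommender/balancer.py | balance
-- ===== SOURCE A (Python) =====
-- def balance(results: list[dict], query: str, limit: int = 10) -> list[dict]:
--     if not results:
--         return []
--
--     # Check if query needs balance (e.g., mentions both tech skills and culture/behavior)
--     # For internship/standard task, we'll try to ensure at least some diversity in top 10
--
--     # Test types categorized:
--     # P-Type: 'Personality & Behaviour', 'Motivation', 'Competencies', 'Biodata & Situational Judgement', 'Video Interview'
--     # K-Type: 'Knowledge & Skills', 'Ability & Aptitude', 'Simulations', 'Coding', 'Technology'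
--
--     p_types = {'Personality & Behaviour', 'Motivation', 'Competencies', 'Biodata & Situational Judgement', 'Video Interview'}
--     k_types = {'Knowledge & Skills', 'Ability & Aptitude', 'Simulations', 'Coding', 'Technology'}
--
--     p_results = []
--     k_results = []
--     other_results = []
--
--     for item in results:
--         item_types = set(item.get("test_type", []))
--         if item_types.intersection(p_types):
--             p_results.append(item)
--         elif item_types.intersection(k_types):
--             k_results.append(item)
--         else:
--             other_results.append(item)
--
--     # Basic balancing: 60/40 or 50/50 mix for top results
--     balanced = []
--     p_idx = 0
--     k_idx = 0
--     other_idx = 0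
--
--     # Interleave if both exist
--     while len(balanced) < limit:
--         added = False
--
--         # Add one from K if available
--         if k_idx < len(k_results):
--             balanced.append(k_results[k_idx])
--             k_idx += 1
--             added = True
--
--         if len(balanced) >= limit: break
--
--         # Add one from P if available
--         if p_idx < len(p_results):
--             balanced.append(p_results[p_idx])
--             p_idx += 1
--             added = True
--
--         if not added:
--             # Add one from 'others' if available
--             if other_idx < len(other_results):
--                 balanced.append(other_results[other_idx])
--                 other_idx += 1
--             else:
--                 break
--
--     return balanced[:limit]
-- ===== SOURCE B (Python) =====
-- P_TYPES = {'Personality & Behaviour', 'Motivation', 'Competencies', 'Biodata & Situational Judgement', 'Video Interview'}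
-- K_TYPES = {'Knowledge & Skills', 'Ability & Aptitude', 'Simulations', 'Coding', 'Technology'}
--
--
-- def balance(results: list[dict], query: str, limit: int = 10) -> list[dict]:
--     if not results:
--         return []
--
--     p_results, k_results, other_results = [], [], []
--     for item in results:
--         types = item.get("test_type", [])
--         if any(t in P_TYPES for t in types):
--             p_results.append(item)
--         elif any(t in K_TYPES for t in types):
--             k_results.append(item)
--         else:
--             other_results.append(item)
--
--     # declarative build: K before P each round, then the leftovers, then the others
--     interleaved = []
--     for a, b in zip(k_results, p_results):
--         interleaved.append(a)
--         interleaved.append(b)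
--     combined = (interleaved
--                 + k_results[len(p_results):]
--                 + p_results[len(k_results):]
--                 + other_results)
--     return combined[:limit] if limit > 0 else []
-- ===== Notes on version B (the rewrite author's own statement) =====
-- stated objective: simpler
-- what changed: The stateful while-loop with three cursor indices and an 'added' flag is replaced by a declarative build: partition as before, zip-interleave K with P, append the leftovers of the longer list and the others, and truncate once to the limit (guarding limit <= 0).
import Mathlib
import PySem

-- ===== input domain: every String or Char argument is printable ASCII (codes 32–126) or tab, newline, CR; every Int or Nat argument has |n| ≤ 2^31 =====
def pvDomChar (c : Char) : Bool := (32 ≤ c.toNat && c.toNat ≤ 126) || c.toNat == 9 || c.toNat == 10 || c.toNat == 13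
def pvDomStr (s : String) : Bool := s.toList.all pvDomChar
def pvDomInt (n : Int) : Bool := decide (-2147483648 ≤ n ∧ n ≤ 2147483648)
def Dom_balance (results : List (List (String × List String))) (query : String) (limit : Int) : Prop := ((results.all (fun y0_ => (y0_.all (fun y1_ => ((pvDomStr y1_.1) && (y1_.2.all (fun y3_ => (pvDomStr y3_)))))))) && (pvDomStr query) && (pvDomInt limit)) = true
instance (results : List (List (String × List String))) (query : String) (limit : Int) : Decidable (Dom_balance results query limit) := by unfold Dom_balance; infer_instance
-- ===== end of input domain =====

-- B replaces A's stateful while-loop (three cursor indices + an 'added' flag) by a declarative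
-- zip-interleave of the K and P partitions followed by leftovers, others, and one final truncation.

-- ===== PORT A =====
-- dict.get("test_type", []) on the association list: first match, default []
def pvGetTestType (item : List (String × List String)) : List String :=
  ((item.find? (fun kv => kv.1 == "test_type")).map Prod.snd).getD []

def pvPTypes : PySem.Set String :=
  PySem.Set.ofList ["Personality & Behaviour", "Motivation", "Competencies", "Biodata & Situational Judgement", "Video Interview"]
def pvKTypes : PySem.Set String :=
  PySem.Set.ofList ["Knowledge & Skills", "Ability & Aptitude", "Simulations", "Coding", "Technology"]

-- A's partition pass: one fold over `results` building (p_results, k_results, other_results)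
def pvPartitionA (results : List (List (String × List String))) :
    List (List (String × List String)) × List (List (String × List String)) × List (List (String × List String)) :=
  results.foldl (fun s item =>
    let itemTypes := PySem.Set.ofList (pvGetTestType item)
    if PySem.Set.inter itemTypes pvPTypes ≠ [] then (s.1 ++ [item], s.2.1, s.2.2)
    else if PySem.Set.inter itemTypes pvKTypes ≠ [] then (s.1, s.2.1 ++ [item], s.2.2)
    else (s.1, s.2.1, s.2.2 ++ [item])) ([], [], [])

-- A's while-loop; the three cursor indices are transcribed as the remaining suffixes of the lists
def balanceLoop (limit : Int) (kRem pRem oRem acc : List (List (String × List String))) :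
    List (List (String × List String)) :=
  if (acc.length : Int) < limit then
    match kRem with
    | k :: ks =>
      let acc2 := acc ++ [k]
      if (acc2.length : Int) ≥ limit then acc2
      else
        match pRem with
        | p :: ps => balanceLoop limit ks ps oRem (acc2 ++ [p])
        | [] => balanceLoop limit ks [] oRem acc2
    | [] =>
      match pRem with
      | p :: ps => balanceLoop limit [] ps oRem (acc ++ [p])
      | [] =>
        match oRem with
        | o :: os => balanceLoop limit [] [] os (acc ++ [o])
        | [] => acc
  else acc
termination_by kRem.length + pRem.length + oRem.length
decreasing_by all_goals (simp only [List.length_cons]; omega)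

def balance (results : List (List (String × List String))) (query : String) (limit : Int) : List (List (String × List String)) :=
  if results = [] then []
  else
    let parts := pvPartitionA results
    let balanced := balanceLoop limit parts.2.1 parts.1 parts.2.2 []
    PySem.List.slice balanced none (some limit)

-- ===== PORT B =====
def pvPList : List String :=
  ["Personality & Behaviour", "Motivation", "Competencies", "Biodata & Situational Judgement", "Video Interview"]
def pvKList : List String :=
  ["Knowledge & Skills", "Ability & Aptitude", "Simulations", "Coding", "Technology"]

def pvPartitionB (results : List (List (String × List String))) :
    List (List (String × List String)) × List (List (String × List String)) × List (List (String × List String)) :=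
  results.foldl (fun s item =>
    let types := pvGetTestType item
    if types.any (fun t => pvPList.contains t) then (s.1 ++ [item], s.2.1, s.2.2)
    else if types.any (fun t => pvKList.contains t) then (s.1, s.2.1 ++ [item], s.2.2)
    else (s.1, s.2.1, s.2.2 ++ [item])) ([], [], [])

def balance_alt (results : List (List (String × List String))) (query : String) (limit : Int) : List (List (String × List String)) :=
  if results = [] then []
  else
    let parts := pvPartitionB results
    let k := parts.2.1
    let p := parts.1
    let interleaved := (k.zip p).foldl (fun acc ab => acc ++ [ab.1, ab.2]) []
    let combined := interleaved ++ k.drop p.length ++ p.drop k.length ++ parts.2.2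
    if 0 < limit then combined.take limit.toNat else []

-- ===== PRECONDITION & SPEC =====
def Spec_balance (results : List (List (String × List String))) (query : String) (limit : Int) (out : List (List (String × List String))) : Prop := out = balance_alt results query limit
instance (results : List (List (String × List String))) (query : String) (limit : Int) (out : List (List (String × List String))) : Decidable (Spec_balance results query limit out) := by unfold Spec_balance; infer_instance

-- ===== CLAIM (what is proved, stated in full; the proofs are below) =====
def Claim_equal_balance : Prop := ∀ (results : List (List (String × List String))) (query : String) (limit : Int), Dom_balance results query limit → Spec_balance results query limit (balance results query limit)

-- ===== LEMMAS AND PROOFS =====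

-- the combined list B builds before truncation, in flatMap form
def pvCombined (k p o : List (List (String × List String))) : List (List (String × List String)) :=
  (k.zip p).flatMap (fun ab => [ab.1, ab.2]) ++ k.drop p.length ++ p.drop k.length ++ o

lemma cond_iff (ts P : List String) :
    (PySem.Set.inter (PySem.Set.ofList ts) P ≠ []) ↔ (ts.any (fun t => P.contains t) = true) := by
  simp only [PySem.Set.inter, PySem.Set.contains_eq_listContains, List.contains_eq_mem, ne_eq,
    List.filter_eq_nil_iff, PySem.Set.mem_ofList, decide_eq_true_eq, not_forall,
    Decidable.not_not, List.any_eq_true, exists_prop]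

lemma pTypes_eq : pvPTypes = pvPList := by decide
lemma kTypes_eq : pvKTypes = pvKList := by decide

lemma partition_eq (results : List (List (String × List String))) :
    pvPartitionA results = pvPartitionB results := by
  unfold pvPartitionA pvPartitionB
  rw [← pTypes_eq, ← kTypes_eq]
  congr 1
  funext s item
  simp only [cond_iff]

lemma pvCombined_cons_cons (k p : List (List (String × List String))) (x y : List (String × List String)) (o : List (List (String × List String))) :
    pvCombined (x :: k) (y :: p) o = x :: y :: pvCombined k p o := by
  simp [pvCombined]

lemma pvCombined_cons_nil (k : List (List (String × List String))) (x : List (String × List String)) (o : List (List (String × List String))) :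
    pvCombined (x :: k) [] o = x :: pvCombined k [] o := by
  simp [pvCombined]

lemma pvCombined_nil_cons (p : List (List (String × List String))) (y : List (String × List String)) (o : List (List (String × List String))) :
    pvCombined [] (y :: p) o = y :: pvCombined [] p o := by
  simp [pvCombined]

lemma pvCombined_nil_nil (o : List (List (String × List String))) :
    pvCombined [] [] o = o := by
  simp [pvCombined]

lemma take_toNat_cons (n : Int) (x : List (String × List String)) (xs : List (List (String × List String)))
    (h : 1 ≤ n) : (x :: xs).take n.toNat = x :: xs.take (n - 1).toNat := by
  have : n.toNat = (n - 1).toNat + 1 := by omega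
  rw [this, List.take_succ_cons]

lemma balanceLoop_eq (limit : Int) (k p o acc : List (List (String × List String))) :
    balanceLoop limit k p o acc = acc ++ (pvCombined k p o).take (limit - acc.length).toNat := by
  fun_induction balanceLoop limit k p o acc with
  | case1 pR oR acc hlt k' ks acc2 hge =>
      have he : acc2 = acc ++ [k'] := rfl
      rw [he] at hge ⊢
      simp only [List.length_append, List.length_cons, List.length_nil] at hge
      push_cast at hge
      have e1 : (limit - ↑acc.length).toNat = 1 := by omega
      rcases pR with _ | ⟨q, qs⟩
      · rw [pvCombined_cons_nil, e1, List.take_succ_cons, List.take_zero]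
      · rw [pvCombined_cons_cons, e1, List.take_succ_cons, List.take_zero]
  | case2 oR acc hlt k' ks acc2 hge q qs ih =>
      have he : acc2 = acc ++ [k'] := rfl
      rw [he] at hge ih ⊢
      simp only [List.length_append, List.length_cons, List.length_nil] at hge ih
      push_cast at hge ih
      rw [ih, pvCombined_cons_cons, take_toNat_cons _ _ _ (by omega),
          take_toNat_cons _ _ _ (by omega)]
      simp only [List.append_assoc, List.cons_append, List.nil_append]
      have e : (limit - (↑acc.length + 1 + 1) : Int) = limit - ↑acc.length - 1 - 1 := by omega
      rw [e]
  | case3 oR acc hlt k' ks acc2 hge ih =>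
      have he : acc2 = acc ++ [k'] := rfl
      rw [he] at hge ih ⊢
      simp only [List.length_append, List.length_cons, List.length_nil] at hge ih
      push_cast at hge ih
      rw [ih, pvCombined_cons_nil, take_toNat_cons _ _ _ (by omega)]
      simp only [List.append_assoc, List.cons_append, List.nil_append]
      have e : (limit - (↑acc.length + 1) : Int) = limit - ↑acc.length - 1 := by omega
      rw [e]
  | case4 oR acc hlt q qs ih =>
      simp only [List.length_append, List.length_cons, List.length_nil] at ih
      push_cast at ih
      rw [ih, pvCombined_nil_cons, take_toNat_cons _ _ _ (by omega)]
      simp only [List.append_assoc, List.cons_append, List.nil_append]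
      have e : (limit - (↑acc.length + 1) : Int) = limit - ↑acc.length - 1 := by omega
      rw [e]
  | case5 acc hlt o' os ih =>
      simp only [List.length_append, List.length_cons, List.length_nil, pvCombined_nil_nil] at ih
      push_cast at ih
      rw [ih, pvCombined_nil_nil, take_toNat_cons _ _ _ (by omega)]
      simp only [List.append_assoc, List.cons_append, List.nil_append]
      have e : (limit - (↑acc.length + 1) : Int) = limit - ↑acc.length - 1 := by omega
      rw [e]
  | case6 acc hlt =>
      rw [pvCombined_nil_nil]
      simp
  | case7 kR pR oR acc hge =>
      have e : (limit - ↑acc.length).toNat = 0 := by omega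
      rw [e, List.take_zero, List.append_nil]

-- ===== VERDICT (by name: the statement is the Claim_ definition above) =====
theorem balance_spec : Claim_equal_balance := by
  unfold Claim_equal_balance
  intro results query limit _
  unfold Spec_balance balance balance_alt
  by_cases hres : results = []
  · simp [hres]
  · simp only [if_neg hres]
    rw [partition_eq, balanceLoop_eq]
    simp only [List.nil_append, List.length_nil, Nat.cast_zero, sub_zero]
    rw [PySem.List.foldl_append_eq_flatMap]
    by_cases hl : 0 < limit
    · rw [if_pos hl, PySem.List.slice_to _ (le_of_lt hl), List.take_take]
      simp [pvCombined, min_self]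
    · rw [if_neg hl]
      have e : limit.toNat = 0 := by omega
      rw [e, List.take_zero]
      simp [PySem.List.slice]
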